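-- pv_equiv track=rewrite | github.com/hrwhisper/algorithm_course | 3_Greedy/2.py | min_complete_time2
-- ===== SOURCE A (Python) =====
-- def cal_time(order, p, f):
--     cur_p_time = 0
--     total_time = 0
--     for i in order:
--         cur_p_time += p[i]
--         total_time = max(total_time, cur_p_time + f[i])
--     return total_time
--
-- def min_complete_time2(p, f):
--     n = len(p)
--     if n == 0: return 0, []
--     if n == 1: return p[0] + f[0], [0]
--     pf = list(zip(p, f))  # it will be like this: [pi,fi]
--     order = []
--     vis = [False] * n
--     for _ in range(n):
--         cur_min_cost = 0x7fffffff
--         min_id = -1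
--         for _id, (pi, fi) in enumerate(pf):
--             if vis[_id]: continue
--             # if min_id == -1:
--             #     min_id = _id
--             t = max([pi2 + fi2 for _id2, (pi2, fi2) in enumerate(pf) if _id != _id2])
--             t = max(t, fi)
--             if cur_min_cost > t + pi:
--                 cur_min_cost = t + pi
--                 min_id = _id
--         vis[min_id] = True
--         order.append(min_id)
--     min_time = cal_time(order, p, f)
--     return min_time, order
-- ===== SOURCE B (Python) =====
-- def min_complete_time2(p, f):
--     jobs = list(zip(p, f))
--     n = len(jobs)
--     if n == 0:
--         return 0, []
--     s = [pi + fi for pi, fi in jobs]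
--     if n == 1:
--         return s[0], [0]
--     m1 = max(s)
--     i1 = s.index(m1)
--     m2 = max(v for j, v in enumerate(s) if j != i1)
--     key = [max(m2 if i == i1 else m1, fi) + pi for i, (pi, fi) in enumerate(jobs)]
--     order = sorted(range(n), key=lambda i: key[i])
--     cur = total = 0
--     for i in order:
--         pi, fi = jobs[i]
--         cur += pi
--         total = max(total, cur + fi)
--     return total, order
-- ===== Notes on version B (the rewrite author's own statement) =====
-- stated objective: faster
-- what changed: A re-runs an O(n^2) selection scan (with an O(n) inner max) n times; B precomputes the top-two of p+f once, derives each job's fixed cost key in O(n), and stably sorts the indices by it, replacing the O(n^3) triple scan by one O(n log n) sort.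
-- intended difference: On inputs with at least two jobs where some job's cost key max(max_{j!=i}(p_j+f_j), f_i)+p_i reaches A's sentinel 0x7fffffff, A's selection round finds no job below the sentinel, leaves min_id=-1 and corrupts vis/order via Python's -1 wraparound (e.g. returning order [-1,-1]); B returns the intended greedy order of all job indices. — e.g. on min_complete_time2([2147483647, 0], [0, 0]): A returns (0, [-1, -1]), B returns (2147483647, [0, 1])
-- outside the precondition, e.g. on min_complete_time2([1, 2, 3], [9, 9]): A returns (15, [0, 1, -1]), B returns (12, [0, 1])
import Mathlib
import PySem

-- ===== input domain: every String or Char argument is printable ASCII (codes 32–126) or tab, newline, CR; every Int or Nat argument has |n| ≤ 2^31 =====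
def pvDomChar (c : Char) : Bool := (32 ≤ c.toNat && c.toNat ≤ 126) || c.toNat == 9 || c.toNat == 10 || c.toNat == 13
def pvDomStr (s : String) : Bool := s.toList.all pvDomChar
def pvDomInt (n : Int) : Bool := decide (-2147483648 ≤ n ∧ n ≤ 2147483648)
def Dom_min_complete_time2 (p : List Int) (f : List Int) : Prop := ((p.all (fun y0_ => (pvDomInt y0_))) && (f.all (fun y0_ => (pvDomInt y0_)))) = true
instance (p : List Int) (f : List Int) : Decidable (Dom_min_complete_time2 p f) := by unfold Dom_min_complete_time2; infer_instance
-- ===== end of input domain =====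

-- ===== PORT A =====
-- B replaces A's O(n^3) repeated selection scans by one O(n log n) stable sort on a precomputed key.
-- Port of cal_time (helper of A)
def pvCalTime (order : List Int) (p : List Int) (f : List Int) : Int :=
  (order.foldl (fun (st : Int × Int) i =>
      let cur := st.1 + PySem.List.pyGetD p i 0
      (cur, max st.2 (cur + PySem.List.pyGetD f i 0))) (0, 0)).2

-- A's inner 'for _id, (pi, fi) in enumerate(pf)' loop, as structural recursion on the enumerated list;
-- acc = (cur_min_cost, min_id).  max([]) raises in Python; the .getD 0 default is reached only outside Pre_.
def pvInner (pf : List (Int × Int)) (vis : List Bool) : List (Int × (Int × Int)) → Int × Int → Int × Int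
  | [], acc => acc
  | (i, pifi) :: rest, acc =>
    if PySem.List.pyGetD vis i false then pvInner pf vis rest acc
    else
      let t0 := (PySem.List.max? (((PySem.List.enumerate pf).filter
                  (fun e2 => decide (i ≠ e2.1))).map (fun e2 => e2.2.1 + e2.2.2)) (fun v => v)).getD 0
      let t := max t0 pifi.2
      if acc.1 > t + pifi.1 then pvInner pf vis rest (t + pifi.1, i) else pvInner pf vis rest acc

-- A's outer 'for _ in range(n)' loop; state = (vis, order)
def pvOuter (pf : List (Int × Int)) : Nat → List Bool × List Int → List Bool × List Int
  | 0, st => st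
  | k+1, st =>
    let mi := (pvInner pf st.1 (PySem.List.enumerate pf) (2147483647, -1)).2
    pvOuter pf k (PySem.List.pySetD st.1 mi true, st.2 ++ [mi])

def min_complete_time2 (p : List Int) (f : List Int) : Int × List Int :=
  let n := p.length
  if n = 0 then (0, [])
  else if n = 1 then (PySem.List.pyGetD p 0 0 + PySem.List.pyGetD f 0 0, [0])
  else
    let pf := p.zip f
    let st := pvOuter pf n (List.replicate n false, [])
    (pvCalTime st.2 p f, st.2)

-- ===== PORT B =====
def min_complete_time2_alt (p : List Int) (f : List Int) : Int × List Int :=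
  let jobs := p.zip f
  let n := jobs.length
  if n = 0 then (0, [])
  else
    let s := jobs.map (fun j => j.1 + j.2)
    if n = 1 then (PySem.List.pyGetD s 0 0, [0])
    else
      let m1 := (PySem.List.max? s (fun v => v)).getD 0
      let i1 := ((PySem.List.index? s m1).getD 0 : Nat)
      let m2 := (PySem.List.max? (((PySem.List.enumerate s).filter
                  (fun e => decide (e.1 ≠ (i1 : Int)))).map (fun e => e.2)) (fun v => v)).getD 0
      let key := (PySem.List.enumerate jobs).map
                  (fun e => max (if e.1 = (i1 : Int) then m2 else m1) e.2.2 + e.2.1)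
      let order := PySem.List.sorted (PySem.List.pyRange 0 (n : Int) 1)
                  (fun i => PySem.List.pyGetD key i 0)
      let res := order.foldl (fun (st : Int × Int) i =>
          let pr := PySem.List.pyGetD jobs i (0, 0)
          (st.1 + pr.1, max st.2 (st.1 + pr.1 + pr.2))) (0, 0)
      (res.2, order)

-- ===== PRECONDITION & SPEC =====
-- Pre_ excludes inputs with fewer finishing times than processing times: there zip silently drops the
-- extra jobs and the leftover selection rounds have no candidate, so neither A's wraparound-padded
-- order (or its IndexError/ValueError when f is empty or zip keeps one pair) nor B's truncated order
-- is a specified value for this unspecified corner.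
def Pre_min_complete_time2 (p : List Int) (f : List Int) : Prop := p.length ≤ f.length
instance (p : List Int) (f : List Int) : Decidable (Pre_min_complete_time2 p f) := by
  unfold Pre_min_complete_time2; infer_instance
def pvWitness_min_complete_time2 : List Int × List Int := ([1, 2], [3, 4])

-- On inputs with ≥ 2 jobs where some job's greedy cost reaches A's sentinel 0x7fffffff (some
-- p[i]+f[i], or some p[i]+p[j]+f[j] with i ≠ j, is ≥ 2147483647), A's selection round finds no job
-- below the sentinel, keeps min_id = -1 and corrupts vis/order through Python's -1 wraparound;
-- B returns the intended greedy order of all job indices.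
def D_min_complete_time2 (p : List Int) (f : List Int) : Prop :=
  2 ≤ p.length ∧
    ((∃ i < p.length, 2147483647 ≤ p.getD i 0 + f.getD i 0) ∨
     (∃ i < p.length, ∃ j < p.length, i ≠ j ∧
        2147483647 ≤ p.getD i 0 + (p.getD j 0 + f.getD j 0)))
instance (p : List Int) (f : List Int) : Decidable (D_min_complete_time2 p f) := by
  unfold D_min_complete_time2; infer_instance

def Spec_min_complete_time2 (p : List Int) (f : List Int) (out : Int × List Int) : Prop :=
  ¬ D_min_complete_time2 p f → out = min_complete_time2_alt p f
instance (p : List Int) (f : List Int) (out : Int × List Int) :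
    Decidable (Spec_min_complete_time2 p f out) := by
  unfold Spec_min_complete_time2; infer_instance

def pvDiffWitness_min_complete_time2 : List Int × List Int := ([2147483647, 0], [0, 0])
def pvDiffWitnessOut_min_complete_time2 : (Int × List Int) × (Int × List Int) :=
  ((0, [-1, -1]), (2147483647, [0, 1]))

-- ===== CLAIM (what is proved, stated in full; the proofs are below) =====
def Claim_unchanged_min_complete_time2 : Prop := ∀ (p : List Int) (f : List Int), Dom_min_complete_time2 p f → Pre_min_complete_time2 p f → Spec_min_complete_time2 p f (min_complete_time2 p f)
def Claim_changed_min_complete_time2 : Prop := Dom_min_complete_time2 (pvDiffWitness_min_complete_time2.1) (pvDiffWitness_min_complete_time2.2) ∧ Pre_min_complete_time2 (pvDiffWitness_min_complete_time2.1) (pvDiffWitness_min_complete_time2.2) ∧ D_min_complete_time2 (pvDiffWitness_min_complete_time2.1) (pvDiffWitness_min_complete_time2.2) ∧ min_complete_time2 (pvDiffWitness_min_complete_time2.1) (pvDiffWitness_min_complete_time2.2) = pvDiffWitnessOut_min_complete_time2.1 ∧ min_complete_time2_alt (pvDiffWitness_min_complete_time2.1) (pvDiffWitness_min_complete_time2.2)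 = pvDiffWitnessOut_min_complete_time2.2 ∧ pvDiffWitnessOut_min_complete_time2.1 ≠ pvDiffWitnessOut_min_complete_time2.2

def Claim_exact_min_complete_time2 : Prop := ∀ (p : List Int) (f : List Int), Dom_min_complete_time2 p f → Pre_min_complete_time2 p f → D_min_complete_time2 p f → min_complete_time2 p f ≠ min_complete_time2_alt p f

-- ===== LEMMAS AND PROOFS =====

-- ---- proof-side abbreviations ----

-- first-extremal max VALUE of a list (getD 0 only reached on [])
def pvMOf (L : List Int) : Int := (PySem.List.max? L (fun v => v)).getD 0

-- the values s_j for j ≠ k, in index order (the common shape of all three max-scans)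
def pvCL (s : List Int) (k : Nat) : List Int :=
  ((List.range s.length).filter (fun j => decide (j ≠ k))).map (fun j => s.getD j 0)

def pvSums (p f : List Int) : List Int := (p.zip f).map (fun j => j.1 + j.2)
def pvI1 (s : List Int) : Nat := (PySem.List.index? s (pvMOf s)).getD 0

-- cost candidate of one inner-loop entry, exactly A's 't + pi'
def pvTE (pf : List (Int × Int)) (e : Int × (Int × Int)) : Int :=
  max ((PySem.List.max? (((PySem.List.enumerate pf).filter
        (fun e2 => decide (e.1 ≠ e2.1))).map (fun e2 => e2.2.1 + e2.2.2)) (fun v => v)).getD 0)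
      e.2.2 + e.2.1

-- B's key list and key function
def pvKeyList (p f : List Int) : List Int :=
  (PySem.List.enumerate (p.zip f)).map
    (fun e => max (if e.1 = ((pvI1 (pvSums p f)) : Int)
                   then pvMOf (((PySem.List.enumerate (pvSums p f)).filter
                          (fun e2 => decide (e2.1 ≠ ((pvI1 (pvSums p f)) : Int)))).map (fun e2 => e2.2))
                   else pvMOf (pvSums p f)) e.2.2 + e.2.1)
def pvKEY (p f : List Int) (i : Int) : Int := PySem.List.pyGetD (pvKeyList p f) i 0
def pvR (p f : List Int) (a b : Int) : Prop :=
  pvKEY p f a < pvKEY p f b ∨ (pvKEY p f a = pvKEY p f b ∧ a < b)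
def pvSIdx (p f : List Int) : List Int :=
  PySem.List.sorted (PySem.List.pyRange 0 ((p.zip f).length : Int) 1)
    (fun i => PySem.List.pyGetD (pvKeyList p f) i 0)

-- visited-list invariant of the outer loop
def pvInv (n : Nat) (vis : List Bool) (t : List Int) : Prop :=
  vis.length = n ∧ ∀ j : Nat, j < n → vis.getD j false = decide ((j : Int) ∈ t)

-- ---- generic list facts ----

theorem pv_enum_norm {α : Type} (xs : List α) (d : α) :
    PySem.List.enumerate xs = (List.range xs.length).map (fun (j : Nat) => ((j : Int), xs.getD j d)) := by
  rw [PySem.List.enumerate_eq_map_pyRange xs d]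
  simp [PySem.List.len_eq, PySem.List.pyRange_zero_natCast, List.map_map, Function.comp]

theorem pv_mOf_spec (L : List Int) (v : Int) (hv : v ∈ L) (hmax : ∀ y ∈ L, y ≤ v) :
    pvMOf L = v := by
  have hne : L ≠ [] := by rintro rfl; simp at hv
  rcases h : PySem.List.max? L (fun v => v) with _ | m
  · exact absurd ((PySem.List.max?_eq_none_iff L _).1 h) hne
  · have h1 : m ≤ v := hmax m (PySem.List.max?_mem h)
    have h2 : v ≤ m := PySem.List.max?_isMax h v hv
    simp [pvMOf, h]; omega

-- the heart: for k other than the first argmax, the max over s without s_k is max s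
theorem pv_heart (s : List Int) (k : Nat) (hk : k < s.length) (hne : k ≠ pvI1 s) :
    pvMOf (pvCL s k) = pvMOf s := by
  rcases h0 : PySem.List.max? s (fun v => v) with _ | m0
  · have := (PySem.List.max?_eq_none_iff s _).1 h0
    subst this; simp at hk
  · have hm0 : pvMOf s = m0 := by simp [pvMOf, h0]
    have hmem : m0 ∈ s := PySem.List.max?_mem h0
    have hidx : (PySem.List.index? s m0).isSome := (PySem.List.index?_isSome_iff s m0).2 hmem
    rcases hi : PySem.List.index? s m0 with _ | k1
    · rw [hi] at hidx; simp at hidx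
    · obtain ⟨hk1, hsk1, _⟩ := PySem.List.getElem_of_index?_eq_some hi
      have hi1 : pvI1 s = k1 := by unfold pvI1; rw [hm0, hi]; rfl
      rw [hm0]
      apply pv_mOf_spec
      · refine List.mem_map.2 ⟨k1, ?_, ?_⟩
        · refine List.mem_filter.2 ⟨List.mem_range.2 hk1, ?_⟩
          simp; omega
        · simp [List.getD_eq_getElem?_getD, List.getElem?_eq_getElem hk1, hsk1]
      · intro y hy
        rcases List.mem_map.1 hy with ⟨j, hj, rfl⟩
        have hjr : j < s.length := List.mem_range.1 (List.mem_filter.1 hj).1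
        have : s.getD j 0 = s[j] := by
          simp [List.getD_eq_getElem?_getD, List.getElem?_eq_getElem hjr]
        rw [this]
        exact PySem.List.max?_isMax h0 _ (List.getElem_mem hjr)

-- ---- inner loop ----

theorem pvInner_cons (pf : List (Int × Int)) (vis : List Bool) (e : Int × (Int × Int))
    (rest : List (Int × (Int × Int))) (acc : Int × Int) :
    pvInner pf vis (e :: rest) acc =
      if PySem.List.pyGetD vis e.1 false then pvInner pf vis rest acc
      else if acc.1 > pvTE pf e then pvInner pf vis rest (pvTE pf e, e.1)
      else pvInner pf vis rest acc := by
  obtain ⟨i, pifi⟩ := e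
  rfl

theorem pvInner_append (pf : List (Int × Int)) (vis : List Bool)
    (L1 L2 : List (Int × (Int × Int))) (acc : Int × Int) :
    pvInner pf vis (L1 ++ L2) acc = pvInner pf vis L2 (pvInner pf vis L1 acc) := by
  induction L1 generalizing acc with
  | nil => rfl
  | cons e rest ih =>
    obtain ⟨i, pifi⟩ := e
    simp only [List.cons_append, pvInner]
    split
    · exact ih _
    · split <;> exact ih _

theorem pvInner_after (pf : List (Int × Int)) (vis : List Bool)
    (L : List (Int × (Int × Int))) (c m : Int)
    (h : ∀ e ∈ L, PySem.List.pyGetD vis e.1 false = false → ¬ (pvTE pf e < c)) :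
    pvInner pf vis L (c, m) = (c, m) := by
  induction L with
  | nil => rfl
  | cons e rest ih =>
    rw [pvInner_cons]
    by_cases hv : PySem.List.pyGetD vis e.1 false
    · rw [if_pos hv]
      exact ih (fun e' he' => h e' (List.mem_cons_of_mem _ he'))
    · rw [if_neg hv]
      have hnot := h e (List.mem_cons_self) (by simpa using hv)
      rw [if_neg (by omega)]
      exact ih (fun e' he' => h e' (List.mem_cons_of_mem _ he'))

theorem pvInner_gt (pf : List (Int × Int)) (vis : List Bool)
    (L : List (Int × (Int × Int))) (x : Int) :
    ∀ (c m : Int), x < c → (∀ e ∈ L, PySem.List.pyGetD vis e.1 false = false → x < pvTE pf e) →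
    ∃ c' m', pvInner pf vis L (c, m) = (c', m') ∧ x < c' := by
  induction L with
  | nil => exact fun c m hc _ => ⟨c, m, rfl, hc⟩
  | cons e rest ih =>
    intro c m hc h
    rw [pvInner_cons]
    by_cases hv : PySem.List.pyGetD vis e.1 false
    · rw [if_pos hv]
      exact ih c m hc (fun e' he' => h e' (List.mem_cons_of_mem _ he'))
    · rw [if_neg hv]
      have hx := h e (List.mem_cons_self) (by simpa using hv)
      by_cases hlt : c > pvTE pf e
      · rw [if_pos hlt]
        exact ih _ _ hx (fun e' he' => h e' (List.mem_cons_of_mem _ he'))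
      · rw [if_neg hlt]
        exact ih c m hc (fun e' he' => h e' (List.mem_cons_of_mem _ he'))

theorem pvInner_finds (pf : List (Int × Int)) (vis : List Bool)
    (L1 L2 : List (Int × (Int × Int))) (ew : Int × (Int × Int)) (c m : Int)
    (hw : PySem.List.pyGetD vis ew.1 false = false)
    (hc : pvTE pf ew < c)
    (h1 : ∀ e ∈ L1, PySem.List.pyGetD vis e.1 false = false → pvTE pf ew < pvTE pf e)
    (h2 : ∀ e ∈ L2, PySem.List.pyGetD vis e.1 false = false → ¬ (pvTE pf e < pvTE pf ew)) :
    pvInner pf vis (L1 ++ ew :: L2) (c, m) = (pvTE pf ew, ew.1) := by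
  rw [pvInner_append]
  obtain ⟨c1, m1, hrun, hgt⟩ := pvInner_gt pf vis L1 (pvTE pf ew) c m hc h1
  rw [hrun, pvInner_cons, if_neg (by simp [hw]), if_pos (by omega)]
  exact pvInner_after pf vis L2 _ _ (fun e he hu => h2 e he hu)

-- ---- B's sort is pairwise strictly (key, index)-increasing ----

theorem pv_insertBy_pairwise {α : Type} (R : α → α → Prop) (htrans : ∀ a b c, R a b → R b c → R a c)
    (before : α → α → Bool) (x : α) (L : List α)
    (hL : L.Pairwise R)
    (hx : ∀ y ∈ L, (before x y = true → R x y) ∧ (before x y = false → R y x)) :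
    (PySem.List.insertBy before x L).Pairwise R := by
  induction L with
  | nil => exact List.pairwise_singleton R x
  | cons y ys ih =>
    show (if before x y = true then x :: y :: ys else y :: PySem.List.insertBy before x ys).Pairwise R
    by_cases hb : before x y = true
    · rw [if_pos hb]
      have hxy : R x y := (hx y List.mem_cons_self).1 hb
      refine List.Pairwise.cons ?_ hL
      intro z hz
      rcases List.mem_cons.1 hz with rfl | hz'
      · exact hxy
      · exact htrans _ _ _ hxy (List.rel_of_pairwise_cons hL hz')
    · rw [if_neg hb]
      refine List.Pairwise.cons ?_ (ih (List.Pairwise.sublist (List.sublist_cons_self y ys) hL)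
        (fun z hz => hx z (List.mem_cons_of_mem _ hz)))
      intro z hz
      rcases (PySem.List.mem_insertBy before x z ys).1 hz with rfl | hz'
      · exact (hx y List.mem_cons_self).2 (by simpa using hb)
      · exact List.rel_of_pairwise_cons hL hz' 

theorem pv_sorted_pairwise_lex (key : Int → Int) (xs : List Int) (hxs : xs.Pairwise (· < ·)) :
    (PySem.List.sorted xs key).Pairwise
      (fun a b => key a < key b ∨ (key a = key b ∧ a < b)) := by
  have aux : ∀ (l : List Int) (acc : List Int),
      acc.Pairwise (fun a b => key a < key b ∨ (key a = key b ∧ a < b)) →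
      (∀ y ∈ acc, ∀ x ∈ l, y < x) → l.Pairwise (· < ·) →
      (l.foldl (fun acc x => PySem.List.insertBy (fun a b => decide (key a < key b)) x acc)
        acc).Pairwise (fun a b => key a < key b ∨ (key a = key b ∧ a < b)) := by
    intro l
    induction l with
    | nil => intro acc h _ _; exact h
    | cons x rest ih =>
      intro acc hacc hlt hp
      simp only [List.foldl_cons]
      apply ih
      · refine pv_insertBy_pairwise _ ?_ _ _ _ hacc ?_
        · rintro a b c (h1 | ⟨h1, h1'⟩) (h2 | ⟨h2, h2'⟩)
          · exact Or.inl (lt_trans h1 h2)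
          · exact Or.inl (by omega)
          · exact Or.inl (by omega)
          · exact Or.inr ⟨by omega, by omega⟩
        · intro y hy
          constructor
          · intro hb; exact Or.inl (by simpa using hb)
          · intro hb
            have hyx : y < x := hlt y hy x List.mem_cons_self
            have : ¬ (key x < key y) := by simpa using hb
            rcases lt_or_ge (key y) (key x) with h | h
            · exact Or.inl h
            · exact Or.inr ⟨by omega, hyx⟩
      · intro y hy x' hx'
        rcases (PySem.List.mem_insertBy _ _ _ _).1 hy with rfl | hy'
        · exact List.rel_of_pairwise_cons hp hx'
        · exact hlt y hy' x' (List.mem_cons_of_mem _ hx')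
      · exact hp.sublist (List.sublist_cons_self x rest)
  rw [PySem.List.sorted_eq_foldl_insertBy]
  exact aux xs [] (by simp) (by simp) hxs

-- ---- bridging the three max-scans and the key ----

def pvM1v (p f : List Int) : Int := pvMOf (pvSums p f)
def pvM2v (p f : List Int) : Int := pvMOf (pvCL (pvSums p f) (pvI1 (pvSums p f)))
def pvKf (p f : List Int) (k : Nat) : Int :=
  max (if k = pvI1 (pvSums p f) then pvM2v p f else pvM1v p f)
      (((p.zip f).getD k ((0 : Int), (0 : Int))).2) + ((p.zip f).getD k ((0 : Int), (0 : Int))).1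

theorem pv_sums_len (p f : List Int) : (pvSums p f).length = (p.zip f).length := by
  simp [pvSums]

theorem pv_sums_getD (p f : List Int) (j : Nat) (hj : j < (p.zip f).length) :
    (pvSums p f).getD j 0 =
      ((p.zip f).getD j ((0 : Int), (0 : Int))).1 + ((p.zip f).getD j ((0 : Int), (0 : Int))).2 := by
  rw [pvSums, List.getD_eq_getElem?_getD, List.getD_eq_getElem?_getD,
    List.getElem?_map, List.getElem?_eq_getElem hj]
  rfl

theorem pv_mapfilter_congr {α β : Type} (l : List α) (pb qb : α → Bool) (F G : α → β)
    (h1 : ∀ j ∈ l, pb j = qb j) (h2 : ∀ j ∈ l, pb j = true → F j = G j) :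
    (l.filter pb).map F = (l.filter qb).map G := by
  induction l with
  | nil => rfl
  | cons x t ih =>
    have hx := h1 x List.mem_cons_self
    simp only [List.filter_cons]
    by_cases hp : pb x = true
    · rw [if_pos hp, ← hx, if_pos hp]
      simp only [List.map_cons]
      rw [h2 x List.mem_cons_self hp,
        ih (fun j hj => h1 j (List.mem_cons_of_mem _ hj)) (fun j hj => h2 j (List.mem_cons_of_mem _ hj))]
    · rw [if_neg hp, ← hx, if_neg hp]
      exact ih (fun j hj => h1 j (List.mem_cons_of_mem _ hj)) (fun j hj => h2 j (List.mem_cons_of_mem _ hj))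

theorem pv_list_shape (p f : List Int) (k : Nat) :
    ((PySem.List.enumerate (p.zip f)).filter (fun e2 => decide ((k : Int) ≠ e2.1))).map
      (fun e2 => e2.2.1 + e2.2.2) = pvCL (pvSums p f) k := by
  rw [pv_enum_norm (p.zip f) ((0 : Int), (0 : Int)), List.filter_map, List.map_map]
  unfold pvCL
  rw [pv_sums_len]
  apply pv_mapfilter_congr
  · intro j _
    exact decide_eq_decide.2 (by beta_reduce; constructor <;> omega)
  · intro j hj _
    have hjn : j < (p.zip f).length := List.mem_range.1 hj
    rw [pv_sums_getD p f j hjn]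
    rfl

theorem pv_m2list_shape (p f : List Int) :
    ((PySem.List.enumerate (pvSums p f)).filter
        (fun e => decide (e.1 ≠ ((pvI1 (pvSums p f)) : Int)))).map (fun e => e.2)
      = pvCL (pvSums p f) (pvI1 (pvSums p f)) := by
  rw [pv_enum_norm (pvSums p f) 0, List.filter_map, List.map_map]
  unfold pvCL
  apply pv_mapfilter_congr
  · intro j _
    exact decide_eq_decide.2 (by beta_reduce; constructor <;> omega)
  · intro j _ _
    rfl

theorem pv_ifmax (p f : List Int) (k : Nat) (hk : k < (p.zip f).length) :
    pvMOf (pvCL (pvSums p f) k) = (if k = pvI1 (pvSums p f) then pvM2v p f else pvM1v p f) := by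
  by_cases h : k = pvI1 (pvSums p f)
  · rw [if_pos h, h]; rfl
  · rw [if_neg h]
    exact pv_heart (pvSums p f) k (by rw [pv_sums_len]; exact hk) h

theorem pv_key_eq (p f : List Int) (k : Nat) (hk : k < (p.zip f).length) :
    pvKEY p f (k : Int) = pvKf p f k := by
  unfold pvKEY pvKeyList
  rw [pv_enum_norm (p.zip f) ((0 : Int), (0 : Int)), List.map_map, PySem.List.pyGetD_natCast,
    List.getD_eq_getElem?_getD, List.getElem?_map, List.getElem?_range hk]
  simp only [Option.map_some, Option.getD_some, Function.comp]
  have hm2 : pvMOf (((PySem.List.enumerate (pvSums p f)).filter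
      (fun e2 => decide (e2.1 ≠ ((pvI1 (pvSums p f)) : Int)))).map (fun e2 => e2.2)) = pvM2v p f := by
    unfold pvMOf pvM2v
    rw [pv_m2list_shape]
    rfl
  rw [hm2, pvKf, pvM1v]
  simp [Nat.cast_inj]

theorem pv_TE_eq (p f : List Int) (k : Nat) (hk : k < (p.zip f).length) :
    pvTE (p.zip f) ((k : Int), (p.zip f).getD k ((0 : Int), (0 : Int))) = pvKf p f k := by
  unfold pvTE
  rw [pv_list_shape p f k]
  have h2 := pv_ifmax p f k hk
  unfold pvMOf at h2
  rw [h2]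
  rfl

theorem pv_zip_getD (p f : List Int) (hpre : p.length ≤ f.length) (k : Nat) (hk : k < p.length) :
    (p.zip f).getD k ((0 : Int), (0 : Int)) = (p.getD k 0, f.getD k 0) := by
  have hkf : k < f.length := by omega
  have hkz : k < (p.zip f).length := by simp; omega
  rw [List.getD_eq_getElem?_getD, List.getElem?_eq_getElem hkz, List.getElem_zip,
    List.getD_eq_getElem?_getD, List.getElem?_eq_getElem hk,
    List.getD_eq_getElem?_getD, List.getElem?_eq_getElem hkf]
  rfl

theorem pv_bound (p f : List Int) (hpre : p.length ≤ f.length) (hn2 : 2 ≤ p.length)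
    (hnd : ¬ D_min_complete_time2 p f) :
    ∀ k : Nat, k < (p.zip f).length → pvKf p f k < 2147483647 := by
  intro k hkz
  have hk : k < p.length := by simp at hkz; omega
  have hnd' : ¬ ((∃ i < p.length, 2147483647 ≤ p.getD i 0 + f.getD i 0) ∨
      (∃ i < p.length, ∃ j < p.length, i ≠ j ∧
        2147483647 ≤ p.getD i 0 + (p.getD j 0 + f.getD j 0))) :=
    fun h => hnd ⟨hn2, h⟩
  push Not at hnd'
  obtain ⟨hself, hpair⟩ := hnd'
  have hzl : (p.zip f).length = p.length := by simp; omega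
  have hslen : (pvSums p f).length = p.length := by rw [pv_sums_len]; omega
  have hsj : ∀ t : Nat, t < p.length → (pvSums p f).getD t 0 = p.getD t 0 + f.getD t 0 := by
    intro t ht
    rw [pv_sums_getD p f t (by omega : t < (p.zip f).length), pv_zip_getD p f hpre t ht]
  obtain ⟨j0, hj0, hj0k⟩ : ∃ j0, j0 < p.length ∧ j0 ≠ k := by
    refine ⟨if k = 0 then 1 else 0, ?_⟩
    split <;> omega
  have hmem0 : (pvSums p f).getD j0 0 ∈ pvCL (pvSums p f) k := by
    refine List.mem_map.2 ⟨j0, List.mem_filter.2 ⟨List.mem_range.2 (by omega), by simp [hj0k]⟩, rfl⟩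
  rcases hmx : PySem.List.max? (pvCL (pvSums p f) k) (fun v => v) with _ | m
  · rw [(PySem.List.max?_eq_none_iff _ _).1 hmx] at hmem0
    simp at hmem0
  · obtain ⟨j, hjf, hjeq⟩ := List.mem_map.1 (PySem.List.max?_mem hmx)
    have hjr : j < p.length := by
      have := List.mem_range.1 (List.mem_filter.1 hjf).1
      omega
    have hjk : j ≠ k := by
      have := (List.mem_filter.1 hjf).2
      simpa using this
    have h1 : p.getD k 0 + (p.getD j 0 + f.getD j 0) < 2147483647 := hpair k hk j hjr (by omega)
    have h2 : p.getD k 0 + f.getD k 0 < 2147483647 := hself k hk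
    unfold pvKf
    rw [pv_zip_getD p f hpre k hk, ← pv_ifmax p f k hkz]
    unfold pvMOf
    rw [hmx]
    simp only [Option.getD_some]
    rw [← hjeq, hsj j hjr]
    omega

-- ---- instantiated facts about sIdx ----

theorem pv_sIdx_perm (p f : List Int) :
    (pvSIdx p f).Perm (PySem.List.pyRange 0 ((p.zip f).length : Int) 1) := by
  exact PySem.List.sorted_perm _ _ _

theorem pv_sIdx_pairwise (p f : List Int) : (pvSIdx p f).Pairwise (pvR p f) := by
  have hxs : (PySem.List.pyRange 0 ((p.zip f).length : Int) 1).Pairwise (· < ·) := by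
    rw [PySem.List.pyRange_zero_natCast]
    exact (List.pairwise_lt_range).map _ (fun a b h => by exact_mod_cast h)
  exact pv_sorted_pairwise_lex _ _ hxs

theorem pv_sIdx_len (p f : List Int) : (pvSIdx p f).length = (p.zip f).length := by
  unfold pvSIdx
  rw [PySem.List.length_sorted, PySem.List.pyRange_zero_natCast]
  simp

theorem pv_sIdx_nodup (p f : List Int) : (pvSIdx p f).Nodup := by
  refine List.Perm.nodup (pv_sIdx_perm p f).symm ?_
  rw [PySem.List.pyRange_zero_natCast]
  exact (List.nodup_range).map (fun a b h => by exact_mod_cast h)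

theorem pv_sIdx_mem (p f : List Int) (a : Int) :
    a ∈ pvSIdx p f ↔ ∃ k : Nat, k < (p.zip f).length ∧ a = (k : Int) := by
  rw [(pv_sIdx_perm p f).mem_iff, PySem.List.pyRange_zero_natCast]
  simp [List.mem_map, eq_comm]

theorem pv_round (p f : List Int) (vis : List Bool) (r : Nat)
    (hr : r < (p.zip f).length)
    (hinv : pvInv (p.zip f).length vis ((pvSIdx p f).take r))
    (hbound : ∀ k : Nat, k < (p.zip f).length → pvKf p f k < 2147483647) :
    pvInner (p.zip f) vis (PySem.List.enumerate (p.zip f)) (2147483647, -1)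
      = (pvKEY p f ((pvSIdx p f).getD r 0), (pvSIdx p f).getD r 0) := by
  have hlenS : (pvSIdx p f).length = (p.zip f).length := pv_sIdx_len p f
  have hrS : r < (pvSIdx p f).length := by omega
  have hgetD : (pvSIdx p f).getD r 0 = (pvSIdx p f)[r] := by
    rw [List.getD_eq_getElem?_getD, List.getElem?_eq_getElem hrS]; rfl
  obtain ⟨wk, hwk, hwcast⟩ := (pv_sIdx_mem p f ((pvSIdx p f)[r])).1 (List.getElem_mem hrS)
  obtain ⟨hvlen, hvinv⟩ := hinv
  have hunv : ∀ j : Nat, j < (p.zip f).length →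
      (PySem.List.pyGetD vis ((j : Int)) false = false ↔ (j : Int) ∉ (pvSIdx p f).take r) := by
    intro j hj
    rw [PySem.List.pyGetD_natCast, hvinv j hj]
    simp
  have hwunv : PySem.List.pyGetD vis ((wk : Int)) false = false := by
    rw [hunv wk hwk]
    intro hmem
    obtain ⟨i, hi, hieq⟩ := List.mem_take_iff_getElem.1 hmem
    have h2 : i < (pvSIdx p f).length := by omega
    rw [← hwcast] at hieq
    have := ((pv_sIdx_nodup p f).getElem_inj_iff).1 hieq
    omega
  have hRj : ∀ j : Nat, j < (p.zip f).length → PySem.List.pyGetD vis ((j : Int)) false = false →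
      j ≠ wk → pvR p f ((wk : Int)) ((j : Int)) := by
    intro j hj hv hne
    have hjmem : ((j : Int)) ∈ pvSIdx p f := (pv_sIdx_mem p f _).2 ⟨j, hj, rfl⟩
    have hnotin : (j : Int) ∉ (pvSIdx p f).take r := (hunv j hj).1 hv
    have hdrop : ((j : Int)) ∈ (pvSIdx p f).drop r := by
      rw [← List.take_append_drop r (pvSIdx p f), List.mem_append] at hjmem
      tauto
    obtain ⟨i, hi, hieq⟩ := List.mem_drop_iff_getElem.1 hdrop
    rcases Nat.eq_zero_or_pos i with rfl | hipos
    · exfalso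
      apply hne
      have hx : (pvSIdx p f)[r] = ((j : Int)) := by simpa using hieq
      rw [hwcast] at hx
      exact_mod_cast hx.symm
    · have hp := List.pairwise_iff_getElem.1 (pv_sIdx_pairwise p f) r (r + i) hrS (by omega) (by omega)
      rw [hieq, hwcast] at hp
      exact hp
  have hLlen : (PySem.List.enumerate (p.zip f)).length = (p.zip f).length :=
    PySem.List.length_enumerate _ _
  have hwkL : wk < (PySem.List.enumerate (p.zip f)).length := by omega
  have hnorm := pv_enum_norm (p.zip f) ((0 : Int), (0 : Int))
  have hgetL : ∀ (m : Nat) (hm : m < (p.zip f).length),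
      (PySem.List.enumerate (p.zip f))[m]'(by omega)
        = ((m : Int), (p.zip f).getD m ((0 : Int), (0 : Int))) := by
    intro m hm
    simp [hnorm]
  have hdecomp : PySem.List.enumerate (p.zip f)
      = (PySem.List.enumerate (p.zip f)).take wk
        ++ ((wk : Int), (p.zip f).getD wk ((0 : Int), (0 : Int)))
          :: (PySem.List.enumerate (p.zip f)).drop (wk + 1) := by
    conv_lhs => rw [← List.take_append_drop wk (PySem.List.enumerate (p.zip f))]
    rw [List.drop_eq_getElem_cons hwkL, hgetL wk hwk]
  rw [hdecomp]
  have hfind := pvInner_finds (p.zip f) vis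
      ((PySem.List.enumerate (p.zip f)).take wk)
      ((PySem.List.enumerate (p.zip f)).drop (wk + 1))
      ((wk : Int), (p.zip f).getD wk ((0 : Int), (0 : Int))) 2147483647 (-1)
      hwunv
      (by rw [pv_TE_eq p f wk hwk]; exact hbound wk hwk)
      (by
        intro e he hv
        obtain ⟨i, hi, hieq⟩ := List.mem_take_iff_getElem.1 he
        have hin : i < (p.zip f).length := by omega
        rw [hgetL i hin] at hieq
        rw [← hieq] at hv ⊢
        rw [pv_TE_eq p f wk hwk, pv_TE_eq p f i hin]
        rcases hRj i hin hv (by omega) with h | ⟨heq, hlt⟩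
        · rw [pv_key_eq p f wk hwk, pv_key_eq p f i hin] at h
          exact h
        · exfalso
          have : wk < i := by exact_mod_cast hlt
          omega)
      (by
        intro e he hv
        obtain ⟨i, hi, hieq⟩ := List.mem_drop_iff_getElem.1 he
        have hin : wk + 1 + i < (p.zip f).length := by omega
        rw [hgetL (wk + 1 + i) hin] at hieq
        rw [← hieq] at hv ⊢
        rw [pv_TE_eq p f wk hwk, pv_TE_eq p f (wk + 1 + i) hin]
        rcases hRj (wk + 1 + i) hin hv (by omega) with h | ⟨heq, hlt⟩
        · rw [pv_key_eq p f wk hwk, pv_key_eq p f (wk + 1 + i) hin] at h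
          omega
        · rw [pv_key_eq p f wk hwk, pv_key_eq p f (wk + 1 + i) hin] at heq
          omega)
  rw [hfind, hgetD, hwcast]
  have := pv_TE_eq p f wk hwk
  rw [pv_key_eq p f wk hwk]
  rw [this]

theorem pv_outer_spec (p f : List Int)
    (hbound : ∀ k : Nat, k < (p.zip f).length → pvKf p f k < 2147483647) :
    ∀ (k : Nat) (vis : List Bool), k ≤ (p.zip f).length →
      pvInv (p.zip f).length vis ((pvSIdx p f).take ((p.zip f).length - k)) →
      (pvOuter (p.zip f) k (vis, (pvSIdx p f).take ((p.zip f).length - k))).2 = pvSIdx p f := by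
  intro k
  induction k with
  | zero =>
    intro vis _ _
    show ((pvSIdx p f).take ((p.zip f).length - 0)) = pvSIdx p f
    rw [Nat.sub_zero, ← pv_sIdx_len p f, List.take_length]
  | succ k ih =>
    intro vis hk hinv
    have hr : (p.zip f).length - (k + 1) < (p.zip f).length := by omega
    have hlenS : (pvSIdx p f).length = (p.zip f).length := pv_sIdx_len p f
    have hrS : (p.zip f).length - (k + 1) < (pvSIdx p f).length := by omega
    have hgetD : (pvSIdx p f).getD ((p.zip f).length - (k + 1)) 0
        = (pvSIdx p f)[(p.zip f).length - (k + 1)] := by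
      rw [List.getD_eq_getElem?_getD, List.getElem?_eq_getElem hrS]; rfl
    obtain ⟨wk, hwk, hwcast⟩ :=
      (pv_sIdx_mem p f ((pvSIdx p f)[(p.zip f).length - (k + 1)])).1 (List.getElem_mem hrS)
    have hround := pv_round p f vis ((p.zip f).length - (k + 1)) hr hinv hbound
    show (pvOuter (p.zip f) k ( _, _)).2 = pvSIdx p f
    rw [hround]
    have htake : (pvSIdx p f).take ((p.zip f).length - (k + 1))
          ++ [(pvSIdx p f).getD ((p.zip f).length - (k + 1)) 0]
        = (pvSIdx p f).take ((p.zip f).length - k) := by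
      have hstep : (p.zip f).length - k = ((p.zip f).length - (k + 1)) + 1 := by omega
      rw [hstep, List.take_add_one, List.getElem?_eq_getElem hrS, hgetD]
      rfl
    have hinv' : pvInv (p.zip f).length
        (PySem.List.pySetD vis ((pvSIdx p f).getD ((p.zip f).length - (k + 1)) 0) true)
        ((pvSIdx p f).take ((p.zip f).length - k)) := by
      obtain ⟨hvlen, hvinv⟩ := hinv
      rw [hgetD, hwcast, PySem.List.pySetD_natCast]
      constructor
      · rw [List.length_set]; exact hvlen
      · intro j hj
        rw [← htake, hgetD, hwcast]
        rw [List.getD_eq_getElem?_getD, List.getElem?_set]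
        by_cases hje : wk = j
        · subst hje
          rw [if_pos rfl, if_pos (by omega)]
          simp
        · rw [if_neg hje, ← List.getD_eq_getElem?_getD, hvinv j hj]
          have : ((j : Int) ∈ (pvSIdx p f).take ((p.zip f).length - (k + 1)) ++ [(wk : Int)])
              ↔ ((j : Int) ∈ (pvSIdx p f).take ((p.zip f).length - (k + 1))) := by
            rw [List.mem_append]
            constructor
            · rintro (h | h)
              · exact h
              · exfalso
                have : (j : Int) = (wk : Int) := by simpa using h
                exact hje (by exact_mod_cast this.symm)
            · exact Or.inl
          simp only [this]
    have hfin := ih (PySem.List.pySetD vis ((pvSIdx p f).getD ((p.zip f).length - (k + 1)) 0) true)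
      (by omega) hinv'
    rw [← htake] at hfin
    exact hfin

-- ---- tightness: inside D_ some round keeps min_id = -1, so A's order contains -1 ----

-- the number of still-selectable jobs (unvisited, cost below the sentinel)
def pvMu (p f : List Int) (vis : List Bool) : Nat :=
  (List.range (p.zip f).length).countP
    (fun j => !vis.getD j false && decide (pvKf p f j < 2147483647))

theorem pvInner_result (pf : List (Int × Int)) (vis : List Bool)
    (L : List (Int × (Int × Int))) : ∀ c m : Int,
    pvInner pf vis L (c, m) = (c, m) ∨
      ∃ e ∈ L, PySem.List.pyGetD vis e.1 false = false ∧
        (pvInner pf vis L (c, m)).2 = e.1 ∧ pvTE pf e < c := by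
  induction L with
  | nil => intro c m; exact Or.inl rfl
  | cons e rest ih =>
    intro c m
    rw [pvInner_cons]
    by_cases hv : PySem.List.pyGetD vis e.1 false
    · rw [if_pos hv]
      rcases ih c m with h | ⟨e', he', hv', h2, h3⟩
      · exact Or.inl h
      · exact Or.inr ⟨e', List.mem_cons_of_mem _ he', hv', h2, h3⟩
    · rw [if_neg hv]
      by_cases hlt : c > pvTE pf e
      · rw [if_pos hlt]
        rcases ih (pvTE pf e) e.1 with h | ⟨e', he', hv', h2, h3⟩
        · refine Or.inr ⟨e, List.mem_cons_self, by simpa using hv, ?_, hlt⟩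
          rw [h]
        · exact Or.inr ⟨e', List.mem_cons_of_mem _ he', hv', h2, by omega⟩
      · rw [if_neg hlt]
        rcases ih c m with h | ⟨e', he', hv', h2, h3⟩
        · exact Or.inl h
        · exact Or.inr ⟨e', List.mem_cons_of_mem _ he', hv', h2, h3⟩

theorem pvOuter_suffix (pf : List (Int × Int)) : ∀ (k : Nat) (vis : List Bool) (order : List Int),
    ∃ t, (pvOuter pf k (vis, order)).2 = order ++ t := by
  intro k
  induction k with
  | zero => exact fun vis order => ⟨[], by simp [pvOuter]⟩
  | succ k ih =>
    intro vis order
    obtain ⟨t, ht⟩ := ih (PySem.List.pySetD vis (pvInner pf vis (PySem.List.enumerate pf) (2147483647, -1)).2 true)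
      (order ++ [(pvInner pf vis (PySem.List.enumerate pf) (2147483647, -1)).2])
    exact ⟨(pvInner pf vis (PySem.List.enumerate pf) (2147483647, -1)).2 :: t, by
      show (pvOuter pf k _).2 = _
      rw [ht, List.append_assoc]
      rfl⟩

theorem pv_mu_decr (p f : List Int) (vis : List Bool) (j : Nat)
    (hlen : vis.length = (p.zip f).length) (hj : j < (p.zip f).length)
    (hun : vis.getD j false = false) (hkey : pvKf p f j < 2147483647) :
    pvMu p f (vis.set j true) < pvMu p f vis := by
  unfold pvMu
  have hjr : j < (List.range (p.zip f).length).length := by simpa using hj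
  have hsplit : List.range (p.zip f).length
      = (List.range (p.zip f).length).take j ++ j :: (List.range (p.zip f).length).drop (j + 1) := by
    conv_lhs => rw [← List.take_append_drop j (List.range (p.zip f).length)]
    rw [List.drop_eq_getElem_cons hjr, List.getElem_range]
  rw [hsplit, List.countP_append, List.countP_append, List.countP_cons, List.countP_cons]
  have hsame : ∀ a : Nat, a ≠ j →
      ((!(vis.set j true).getD a false) && decide (pvKf p f a < 2147483647))
      = ((!vis.getD a false) && decide (pvKf p f a < 2147483647)) := by
    intro a hne
    rw [List.getD_eq_getElem?_getD, List.getElem?_set,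
      if_neg (fun h => hne h.symm), ← List.getD_eq_getElem?_getD]
  have htake : ∀ a ∈ (List.range (p.zip f).length).take j, a ≠ j := by
    intro a ha
    obtain ⟨i, hi, hieq⟩ := List.mem_take_iff_getElem.1 ha
    rw [List.getElem_range] at hieq
    omega
  have hdrop : ∀ a ∈ (List.range (p.zip f).length).drop (j + 1), a ≠ j := by
    intro a ha
    obtain ⟨i, hi, hieq⟩ := List.mem_drop_iff_getElem.1 ha
    rw [List.getElem_range] at hieq
    omega
  have hA := List.countP_congr
    (p := fun a => (!(vis.set j true).getD a false && decide (pvKf p f a < 2147483647)))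
    (q := fun a => (!vis.getD a false && decide (pvKf p f a < 2147483647)))
    (l := (List.range (p.zip f).length).take j)
    (fun a ha => by beta_reduce; rw [hsame a (htake a ha)])
  have hB := List.countP_congr
    (p := fun a => (!(vis.set j true).getD a false && decide (pvKf p f a < 2147483647)))
    (q := fun a => (!vis.getD a false && decide (pvKf p f a < 2147483647)))
    (l := (List.range (p.zip f).length).drop (j + 1))
    (fun a ha => by beta_reduce; rw [hsame a (hdrop a ha)])
  rw [hA, hB]
  have h1 : ((!(vis.set j true).getD j false) && decide (pvKf p f j < 2147483647)) = false := by
    rw [List.getD_eq_getElem?_getD, List.getElem?_set, if_pos rfl, if_pos (by omega)]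
    simp
  have h2 : ((!vis.getD j false) && decide (pvKf p f j < 2147483647)) = true := by
    rw [hun]
    simp only [Bool.not_false, Bool.true_and, decide_eq_true_eq]
    exact hkey
  rw [h1, h2]
  simp

theorem pv_fail (p f : List Int) :
    ∀ (k : Nat) (vis : List Bool) (order : List Int),
      vis.length = (p.zip f).length →
      (-1 : Int) ∉ (pvOuter (p.zip f) k (vis, order)).2 →
      (-1 : Int) ∉ order ∧ k ≤ pvMu p f vis := by
  intro k
  induction k with
  | zero =>
    intro vis order _ hno
    exact ⟨hno, Nat.zero_le _⟩
  | succ k ih =>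
    intro vis order hlen hno
    have hstep : (pvOuter (p.zip f) (k + 1) (vis, order)).2
        = (pvOuter (p.zip f) k
            (PySem.List.pySetD vis (pvInner (p.zip f) vis (PySem.List.enumerate (p.zip f)) (2147483647, -1)).2 true,
             order ++ [(pvInner (p.zip f) vis (PySem.List.enumerate (p.zip f)) (2147483647, -1)).2])).2 := rfl
    rw [hstep] at hno
    obtain ⟨t, ht⟩ := pvOuter_suffix (p.zip f) k
      (PySem.List.pySetD vis (pvInner (p.zip f) vis (PySem.List.enumerate (p.zip f)) (2147483647, -1)).2 true)
      (order ++ [(pvInner (p.zip f) vis (PySem.List.enumerate (p.zip f)) (2147483647, -1)).2])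
    have hmine : (pvInner (p.zip f) vis (PySem.List.enumerate (p.zip f)) (2147483647, -1)).2 ≠ -1 := by
      intro h
      apply hno
      rw [ht]
      simp [h]
    rcases pvInner_result (p.zip f) vis (PySem.List.enumerate (p.zip f)) 2147483647 (-1) with hid | ⟨e, he, hv, h2, h3⟩
    · rw [hid] at hmine
      simp at hmine
    · obtain ⟨jk, hjk, hee⟩ := (PySem.List.mem_enumerate_iff _ _ _).1 he
      have hgd : (p.zip f).getD jk ((0 : Int), (0 : Int)) = (p.zip f)[jk] := by
        rw [List.getD_eq_getElem?_getD, List.getElem?_eq_getElem hjk]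
        rfl
      have hTE : pvTE (p.zip f) e = pvKf p f jk := by
        rw [hee]
        have : ((0 : Int) + (jk : Int), (p.zip f)[jk]) = ((jk : Int), (p.zip f).getD jk ((0 : Int), (0 : Int))) := by
          rw [hgd, zero_add]
        rw [this]
        exact pv_TE_eq p f jk hjk
      have hmieq : (pvInner (p.zip f) vis (PySem.List.enumerate (p.zip f)) (2147483647, -1)).2 = (jk : Int) := by
        rw [h2, hee, zero_add]
      have hun : vis.getD jk false = false := by
        rw [hee] at hv
        simp only [zero_add] at hv
        rw [PySem.List.pyGetD_natCast] at hv
        exact hv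
      have hkey : pvKf p f jk < 2147483647 := by
        rw [← hTE]
        omega
      have hset : PySem.List.pySetD vis (pvInner (p.zip f) vis (PySem.List.enumerate (p.zip f)) (2147483647, -1)).2 true
          = vis.set jk true := by
        rw [hmieq, PySem.List.pySetD_natCast]
      rw [hset] at hno
      obtain ⟨hno', hk⟩ := ih (vis.set jk true)
        (order ++ [(pvInner (p.zip f) vis (PySem.List.enumerate (p.zip f)) (2147483647, -1)).2])
        (by simpa using hlen) hno
      refine ⟨fun hmem => hno' (List.mem_append_left _ hmem), ?_⟩
      have := pv_mu_decr p f vis jk hlen hjk hun hkey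
      omega

theorem pv_exists_big (p f : List Int) (hpre : p.length ≤ f.length)
    (hd : D_min_complete_time2 p f) :
    ∃ k0 : Nat, k0 < (p.zip f).length ∧ 2147483647 ≤ pvKf p f k0 := by
  obtain ⟨hn2, hdis⟩ := hd
  have hzl : (p.zip f).length = p.length := by simp; omega
  have hslen : (pvSums p f).length = p.length := by rw [pv_sums_len]; omega
  rcases hdis with ⟨i, hi, hbig⟩ | ⟨i, hi, j, hj, hij, hbig⟩
  · refine ⟨i, by omega, ?_⟩
    unfold pvKf
    rw [pv_zip_getD p f hpre i hi]
    have h := le_max_right (if i = pvI1 (pvSums p f) then pvM2v p f else pvM1v p f) (f.getD i 0)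
    omega
  · refine ⟨i, by omega, ?_⟩
    have hmem : (pvSums p f).getD j 0 ∈ pvCL (pvSums p f) i := by
      refine List.mem_map.2 ⟨j, List.mem_filter.2 ⟨List.mem_range.2 (by omega), ?_⟩, rfl⟩
      simp
      omega
    rcases hmx : PySem.List.max? (pvCL (pvSums p f) i) (fun v => v) with _ | m
    · rw [(PySem.List.max?_eq_none_iff _ _).1 hmx] at hmem
      simp at hmem
    · have hle : (pvSums p f).getD j 0 ≤ m := PySem.List.max?_isMax hmx _ hmem
      have hsj : (pvSums p f).getD j 0 = p.getD j 0 + f.getD j 0 := by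
        rw [pv_sums_getD p f j (by omega), pv_zip_getD p f hpre j hj]
      unfold pvKf
      rw [pv_zip_getD p f hpre i hi, ← pv_ifmax p f i (by omega)]
      unfold pvMOf
      rw [hmx]
      simp only [Option.getD_some]
      have h := le_max_left m (f.getD i 0)
      omega

theorem pv_A_reduce (p f : List Int) (h0 : ¬ (p.length = 0)) (h1 : ¬ (p.length = 1)) :
    min_complete_time2 p f
      = (pvCalTime (pvOuter (p.zip f) p.length (List.replicate p.length false, [])).2 p f,
         (pvOuter (p.zip f) p.length (List.replicate p.length false, [])).2) := by
  simp only [min_complete_time2, h0, h1, if_false]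

theorem pv_B_reduce (p f : List Int) (hB0 : ¬ ((p.zip f).length = 0)) (hB1 : ¬ ((p.zip f).length = 1)) :
    min_complete_time2_alt p f
      = (((pvSIdx p f).foldl (fun (st : Int × Int) i =>
            (st.1 + (PySem.List.pyGetD (p.zip f) i ((0 : Int), (0 : Int))).1,
             max st.2 (st.1 + (PySem.List.pyGetD (p.zip f) i ((0 : Int), (0 : Int))).1
               + (PySem.List.pyGetD (p.zip f) i ((0 : Int), (0 : Int))).2))) ((0 : Int), (0 : Int))).2,
         pvSIdx p f) := by
  simp only [min_complete_time2_alt, hB0, hB1, if_false]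
  rfl

theorem pv_neg_one_in_A (p f : List Int) (hpre : p.length ≤ f.length)
    (hd : D_min_complete_time2 p f) :
    (-1 : Int) ∈ (pvOuter (p.zip f) p.length (List.replicate p.length false, [])).2 := by
  have hn2 : 2 ≤ p.length := hd.1
  have hzl : (p.zip f).length = p.length := by simp; omega
  by_contra hno
  obtain ⟨-, hk⟩ := pv_fail p f p.length (List.replicate p.length false) []
    (by simp; omega) hno
  obtain ⟨k0, hk0, hbig⟩ := pv_exists_big p f hpre hd
  have hlt : pvMu p f (List.replicate p.length false) < (p.zip f).length := by
    unfold pvMu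
    have hle := List.countP_le_length
      (p := fun j => (!(List.replicate p.length false).getD j false && decide (pvKf p f j < 2147483647)))
      (l := List.range (p.zip f).length)
    rw [List.length_range] at hle
    rcases Nat.lt_or_ge ((List.range (p.zip f).length).countP
      (fun j => (!(List.replicate p.length false).getD j false && decide (pvKf p f j < 2147483647))))
      (p.zip f).length with h | h
    · exact h
    · exfalso
      have heq : (List.range (p.zip f).length).countP
          (fun j => (!(List.replicate p.length false).getD j false && decide (pvKf p f j < 2147483647)))
          = (List.range (p.zip f).length).length := by
        rw [List.length_range]
        omega
      have hall := List.countP_eq_length.1 heq k0 (List.mem_range.2 hk0)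
      simp at hall
      omega
  omega

theorem pv_main (p f : List Int) (hpre : p.length ≤ f.length)
    (hnd : ¬ D_min_complete_time2 p f) :
    min_complete_time2 p f = min_complete_time2_alt p f := by
  rcases Nat.lt_or_ge p.length 2 with hsmall | hn2
  · -- n = 0 or n = 1
    interval_cases h : p.length
    · -- p = []
      have hp : p = [] := List.length_eq_zero_iff.1 h
      subst hp
      rfl
    · -- p = [a], f = b :: f'
      obtain ⟨a, hp⟩ := List.length_eq_one_iff.1 h
      subst hp
      obtain ⟨b, f', hf⟩ : ∃ b f', f = b :: f' := by
        cases f with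
        | nil => simp at hpre
        | cons b f' => exact ⟨b, f', rfl⟩
      subst hf
      simp [min_complete_time2, min_complete_time2_alt, PySem.List.pyGetD_zero_cons]
  · have h0 : ¬ (p.length = 0) := by omega
    have h1 : ¬ (p.length = 1) := by omega
    have hlen : (p.zip f).length = p.length := by simp; omega
    have hB0 : ¬ ((p.zip f).length = 0) := by omega
    have hB1 : ¬ ((p.zip f).length = 1) := by omega
    have hbound := pv_bound p f hpre hn2 hnd
    -- A's order is B's sorted index list
    have hinv0 : pvInv (p.zip f).length (List.replicate (p.zip f).length false)
        ((pvSIdx p f).take ((p.zip f).length - (p.zip f).length)) := by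
      rw [Nat.sub_self, List.take_zero]
      refine ⟨List.length_replicate, fun j hj => by simp⟩
    have hord := pv_outer_spec p f hbound (p.zip f).length
      (List.replicate (p.zip f).length false) le_rfl hinv0
    rw [Nat.sub_self, List.take_zero, hlen] at hord
    have hA := pv_A_reduce p f h0 h1
    have hB := pv_B_reduce p f hB0 hB1
    rw [hA, hB, hord]
    -- totals agree: fold over the same order with pointwise-equal step functions
    have hmem : ∀ i ∈ pvSIdx p f, ∃ k : Nat, k < (p.zip f).length ∧ i = (k : Int) :=
      fun i hi => (pv_sIdx_mem p f i).1 hi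
    have hfold : ∀ (acc : Int × Int), ∀ i ∈ pvSIdx p f,
        (acc.1 + PySem.List.pyGetD p i 0,
         max acc.2 (acc.1 + PySem.List.pyGetD p i 0 + PySem.List.pyGetD f i 0))
        = (acc.1 + (PySem.List.pyGetD (p.zip f) i ((0 : Int), (0 : Int))).1,
           max acc.2 (acc.1 + (PySem.List.pyGetD (p.zip f) i ((0 : Int), (0 : Int))).1
             + (PySem.List.pyGetD (p.zip f) i ((0 : Int), (0 : Int))).2)) := by
      intro acc i hi
      obtain ⟨k, hk, rfl⟩ := hmem i hi
      have hkp : k < p.length := by omega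
      have hkf : k < f.length := by omega
      have hz : (p.zip f).getD k ((0 : Int), (0 : Int)) = (p.getD k 0, f.getD k 0) := by
        rw [List.getD_eq_getElem?_getD, List.getElem?_eq_getElem (by omega : k < (p.zip f).length),
          List.getElem_zip, List.getD_eq_getElem?_getD, List.getElem?_eq_getElem hkp,
          List.getD_eq_getElem?_getD, List.getElem?_eq_getElem hkf]
        rfl
      rw [PySem.List.pyGetD_natCast, PySem.List.pyGetD_natCast, PySem.List.pyGetD_natCast, hz]
    unfold pvCalTime
    rw [PySem.List.foldl_congr_mem _ _ _ _ hfold]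

-- ===== VERDICT (by name: the statement is the Claim_ definition above) =====
theorem min_complete_time2_spec : Claim_unchanged_min_complete_time2 := by
  intro p f _ hpre
  unfold Spec_min_complete_time2
  intro hnd
  exact pv_main p f hpre hnd

theorem min_complete_time2_changed : Claim_changed_min_complete_time2 := by
  unfold Claim_changed_min_complete_time2; decide

theorem min_complete_time2_tight : Claim_exact_min_complete_time2 := by
  intro p f _ hpre hd
  have hple : p.length ≤ f.length := hpre
  have hn2 : 2 ≤ p.length := hd.1
  have hlen : (p.zip f).length = p.length := by simp; omega
  rw [pv_A_reduce p f (by omega) (by omega), pv_B_reduce p f (by omega) (by omega)]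
  intro heq
  have hsnd := congrArg Prod.snd heq
  simp only at hsnd
  have hin : (-1 : Int) ∈ pvSIdx p f := by
    rw [← hsnd]
    exact pv_neg_one_in_A p f hple hd
  obtain ⟨k, _, hk⟩ := (pv_sIdx_mem p f (-1)).1 hin
  omega
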